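-- pv_equiv track=rewrite | github.com/kreuzberg-dev/actions | publish-homebrew/scripts/publish.py | insert_bottle_block
-- ===== SOURCE A (Python) =====
-- def insert_bottle_block(formula: str, bottle_block: str) -> str:
--     """Insert the bottle block before the first `  depends_on` line.
--
--     Collapses consecutive blank lines produced by the insertion.
--     If no `  depends_on` is found, the block is appended at the end.
--     """
--     lines = formula.split("\n")
--     result: list[str] = []
--     inserted = False
--
--     for line in lines:
--         if line.startswith("  depends_on") and not inserted:
--             result.append(bottle_block)
--             result.append("")
--             inserted = True
--         result.append(line)
--
--     if not inserted:
--         result.append(bottle_block)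
--
--     return _collapse_blank_lines(result)
--
-- def _collapse_blank_lines(lines: list[str]) -> str:
--     """Join lines, removing consecutive blank lines."""
--     collapsed: list[str] = []
--     prev_blank = False
--     for line in lines:
--         is_blank = line.strip() == ""
--         if is_blank and prev_blank:
--             continue
--         prev_blank = is_blank
--         collapsed.append(line)
--     return "\n".join(collapsed)
-- ===== SOURCE B (Python) =====
-- def insert_bottle_block(formula: str, bottle_block: str) -> str:
--     """Splice the bottle block in by index, then drop each blank line whose
--     predecessor is also blank (a pairwise zip filter instead of stateful loops)."""
--     lines = formula.split("\n")
--     i = next((k for k, ln in enumerate(lines) if ln.startswith("  depends_on")), None)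
--     if i is None:
--         spliced = lines + [bottle_block]
--     else:
--         spliced = lines[:i] + [bottle_block, ""] + lines[i:]
--     kept = spliced[:1] + [cur for prev, cur in zip(spliced, spliced[1:])
--                           if not (cur.strip() == "" and prev.strip() == "")]
--     return "\n".join(kept)
-- ===== Notes on version B (the rewrite author's own statement) =====
-- stated objective: simpler
-- what changed: The stateful for-loop with an 'inserted' flag becomes an index lookup plus list splice, and the stateful blank-collapse loop becomes a pairwise zip filter comparing each line with its predecessor.
import Mathlib
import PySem

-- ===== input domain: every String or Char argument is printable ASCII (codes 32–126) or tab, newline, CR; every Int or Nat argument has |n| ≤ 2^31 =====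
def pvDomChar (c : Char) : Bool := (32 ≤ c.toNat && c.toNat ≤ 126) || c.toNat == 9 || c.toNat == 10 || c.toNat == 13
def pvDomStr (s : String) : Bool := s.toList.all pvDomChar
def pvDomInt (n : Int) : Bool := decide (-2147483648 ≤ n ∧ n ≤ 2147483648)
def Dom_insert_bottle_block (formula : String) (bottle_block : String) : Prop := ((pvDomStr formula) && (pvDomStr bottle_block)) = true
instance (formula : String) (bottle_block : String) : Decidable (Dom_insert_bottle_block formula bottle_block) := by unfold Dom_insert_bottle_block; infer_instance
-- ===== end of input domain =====

-- B replaces A's stateful insertion/collapse loops by an index splice and a pairwise zip filter (simpler decomposition, same cost).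

-- ===== PORT A =====
-- line.strip() == ""
def pvBlank (s : String) : Bool := PySem.Str.strip s == ""

-- formula.split("\n"); sep is nonempty so split? is always some, getD never fires
def pvSplitNL (s : String) : List String := (PySem.Str.split? s "\n").getD []

-- _collapse_blank_lines: stateful loop over (collapsed, prev_blank)
def pvCollapse (lines : List String) : String :=
  let st := lines.foldl (fun (st : List String × Bool) line =>
    if pvBlank line && st.2 then st
    else (st.1 ++ [line], pvBlank line)) ([], false)
  PySem.Str.join "\n" st.1

def insert_bottle_block (formula : String) (bottle_block : String) : String :=
  let lines := pvSplitNL formula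
  let st := lines.foldl (fun (st : List String × Bool) line =>
    if PySem.Str.startswith line "  depends_on" && !st.2
    then (st.1 ++ [bottle_block, "", line], true)
    else (st.1 ++ [line], st.2)) ([], false)
  let result := if !st.2 then st.1 ++ [bottle_block] else st.1
  pvCollapse result

-- ===== PORT B =====
def insert_bottle_block_alt (formula : String) (bottle_block : String) : String :=
  let lines := pvSplitNL formula
  let spliced :=
    match lines.findIdx? (fun ln => PySem.Str.startswith ln "  depends_on") with
    | none => lines ++ [bottle_block]
    | some i => lines.take i ++ [bottle_block, ""] ++ lines.drop i
  let kept := spliced.take 1 ++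
    ((spliced.zip spliced.tail).filter
      (fun pc => !(pvBlank pc.2 && pvBlank pc.1))).map (·.2)
  PySem.Str.join "\n" kept

-- ===== PRECONDITION & SPEC =====
def Spec_insert_bottle_block (formula : String) (bottle_block : String) (out : String) : Prop := out = insert_bottle_block_alt formula bottle_block
instance (formula : String) (bottle_block : String) (out : String) : Decidable (Spec_insert_bottle_block formula bottle_block out) := by unfold Spec_insert_bottle_block; infer_instance

-- ===== CLAIM (what is proved, stated in full; the proofs are below) =====
def Claim_equal_insert_bottle_block : Prop := ∀ (formula : String) (bottle_block : String), Dom_insert_bottle_block formula bottle_block → Spec_insert_bottle_block formula bottle_block (insert_bottle_block formula bottle_block)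

-- ===== LEMMAS AND PROOFS =====

-- functional form of the collapse loop (b = prev_blank)
def pvCol (b : Bool) : List String → List String
  | [] => []
  | x :: xs => if pvBlank x && b then pvCol b xs else x :: pvCol (pvBlank x) xs

-- blankness of the last processed line (the loop's final prev_blank)
def pvLastB (b : Bool) : List String → Bool
  | [] => b
  | x :: xs => pvLastB (pvBlank x) xs

theorem pvCollapse_foldl (ls : List String) :
    ∀ (acc : List String) (b : Bool),
      ls.foldl (fun (st : List String × Bool) line =>
        if pvBlank line && st.2 then st
        else (st.1 ++ [line], pvBlank line)) (acc, b)
      = (acc ++ pvCol b ls, pvLastB b ls) := by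
  induction ls with
  | nil => intro acc b; simp [pvCol, pvLastB]
  | cons x xs ih =>
    intro acc b
    by_cases h : (pvBlank x && b) = true
    · rw [Bool.and_eq_true] at h
      obtain ⟨hx, hb⟩ := h
      subst hb
      simp only [List.foldl_cons, hx, Bool.and_self, if_pos]
      rw [ih acc true]
      simp [pvCol, pvLastB, hx]
    · simp only [List.foldl_cons, h, Bool.false_eq_true, if_false]
      rw [ih (acc ++ [x]) (pvBlank x)]
      simp [pvCol, pvLastB, h]

-- the insertion loop with inserted = true just appends the rest
theorem pvIns_true (bb : String) (ls : List String) : ∀ (acc : List String),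
    ls.foldl (fun (st : List String × Bool) line =>
      if PySem.Str.startswith line "  depends_on" && !st.2
      then (st.1 ++ [bb, "", line], true)
      else (st.1 ++ [line], st.2)) (acc, true) = (acc ++ ls, true) := by
  induction ls with
  | nil => intro acc; simp
  | cons x xs ih =>
    intro acc
    simp only [List.foldl_cons, Bool.not_true, Bool.and_false, Bool.false_eq_true, if_false]
    rw [ih (acc ++ [x])]
    simp

-- the insertion loop from inserted = false computes the splice of B
theorem pvIns_false (bb : String) (ls : List String) : ∀ (acc : List String),
    (let st := ls.foldl (fun (st : List String × Bool) line =>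
        if PySem.Str.startswith line "  depends_on" && !st.2
        then (st.1 ++ [bb, "", line], true)
        else (st.1 ++ [line], st.2)) (acc, false)
     if !st.2 then st.1 ++ [bb] else st.1)
    = acc ++ (match ls.findIdx? (fun ln => PySem.Str.startswith ln "  depends_on") with
      | none => ls ++ [bb]
      | some i => ls.take i ++ [bb, ""] ++ ls.drop i) := by
  induction ls with
  | nil => intro acc; simp
  | cons x xs ih =>
    intro acc
    by_cases h : PySem.Str.startswith x "  depends_on" = true
    · simp only [List.foldl_cons, h, Bool.not_false, Bool.and_true, if_pos,
        List.findIdx?_cons, List.take_zero, List.drop_zero]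
      rw [pvIns_true bb xs (acc ++ [bb, "", x])]
      simp
    · simp only [List.foldl_cons, h, Bool.false_and, Bool.false_eq_true, if_false,
        List.findIdx?_cons]
      rw [ih (acc ++ [x])]
      cases hf : xs.findIdx? (fun ln => PySem.Str.startswith ln "  depends_on") with
      | none => simp [hf]
      | some i => simp [hf, List.take_succ_cons, List.drop_succ_cons]

-- the zip filter of B equals the functional collapse starting from a previous line p
theorem pvZip_eq_col (xs : List String) : ∀ (p : String),
    (((p :: xs).zip xs).filter (fun pc => !(pvBlank pc.2 && pvBlank pc.1))).map (·.2)
      = pvCol (pvBlank p) xs := by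
  induction xs with
  | nil => intro p; simp [pvCol]
  | cons x xs ih =>
    intro p
    rw [List.zip_cons_cons]
    by_cases h : (pvBlank x && pvBlank p) = true
    · rw [Bool.and_eq_true] at h
      obtain ⟨hx, hp⟩ := h
      simp only [List.filter_cons, hx, hp, Bool.and_self, Bool.not_true,
        Bool.false_eq_true, if_false]
      rw [ih x]
      simp [pvCol, hx, hp]
    · simp only [List.filter_cons, h, Bool.not_eq_true', if_pos, List.map_cons]
      rw [ih x]
      simp [pvCol, h]

-- ===== VERDICT (by name: the statement is the Claim_ definition above) =====
theorem insert_bottle_block_spec : Claim_equal_insert_bottle_block := by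
  intro formula bb _
  simp only [Spec_insert_bottle_block, insert_bottle_block, insert_bottle_block_alt,
    pvCollapse]
  rw [pvIns_false bb (pvSplitNL formula) []]
  rw [List.nil_append]
  generalize (match (pvSplitNL formula).findIdx?
      (fun ln => PySem.Str.startswith ln "  depends_on") with
    | none => pvSplitNL formula ++ [bb]
    | some i => (pvSplitNL formula).take i ++ [bb, ""] ++
        (pvSplitNL formula).drop i) = spliced
  rw [pvCollapse_foldl spliced [] false]
  cases spliced with
  | nil => simp [pvCol]
  | cons y ys =>
    simp only [List.nil_append, List.take_succ_cons, List.take_zero, List.tail_cons]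
    rw [pvZip_eq_col ys y]
    simp [pvCol]
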